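-- pv_equiv track=rewrite | github.com/askrid/undergrad-archive | comgaesil-2020-spring/Ch6-A/Ch6-A.py | f14
-- ===== SOURCE A (Python) =====
-- def f14(rows, cols):
--     result = []
--     for row in range(rows):
--         result_row = []
--         for col in range(cols):
--             n = 2 + (0 < col < cols-1) + (0 < row < rows-1)
--             result_row.append(n)
--         result.append(result_row)
--     return result
-- ===== SOURCE B (Python) =====
-- def f14(rows, cols):
--     # Only two distinct row patterns exist: the edge row (first/last) and the
--     # interior row.  Build each once by list repetition, then replicate.
--     if rows <= 0:
--         return []
--     edge = ([2] + [3] * (cols - 2) + [2])[:cols] if cols > 0 else []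
--     inner = [v + 1 for v in edge]
--     grid = [edge] + [inner] * (rows - 2) + [edge]
--     return [list(r) for r in grid[:rows]]
-- ===== Notes on version B (the rewrite author's own statement) =====
-- stated objective: faster
-- what changed: Builds only the two distinct row patterns (edge row and interior row) once by list repetition/concatenation and assembles the grid by replicating them, instead of computing every cell with per-cell edge tests in nested loops.
import Mathlib
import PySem

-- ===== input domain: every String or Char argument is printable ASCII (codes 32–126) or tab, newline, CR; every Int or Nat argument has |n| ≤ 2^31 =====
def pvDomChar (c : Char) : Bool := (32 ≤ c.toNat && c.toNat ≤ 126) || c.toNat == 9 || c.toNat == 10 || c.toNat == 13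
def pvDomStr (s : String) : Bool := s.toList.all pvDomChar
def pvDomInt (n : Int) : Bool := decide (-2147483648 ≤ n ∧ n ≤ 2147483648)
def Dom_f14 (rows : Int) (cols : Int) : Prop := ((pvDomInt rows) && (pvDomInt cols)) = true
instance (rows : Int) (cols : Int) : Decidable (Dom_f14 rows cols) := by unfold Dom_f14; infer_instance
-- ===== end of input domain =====

-- B builds only the two distinct row patterns (edge and interior) by list
-- repetition and assembles the grid by replicating them (alternative decomposition).

-- ===== PORT A =====
def f14 (rows : Int) (cols : Int) : List (List Int) :=
  (PySem.List.pyRange 0 rows 1).foldl (fun result row =>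
    result ++ [(PySem.List.pyRange 0 cols 1).foldl (fun resultRow col =>
      resultRow ++ [2 + (if 0 < col ∧ col < cols - 1 then (1 : Int) else 0)
                      + (if 0 < row ∧ row < rows - 1 then (1 : Int) else 0)]) []]) []

-- ===== PORT B =====
def f14_alt (rows : Int) (cols : Int) : List (List Int) :=
  if rows ≤ 0 then [] else
  let edge : List Int :=
    if 0 < cols then
      PySem.List.slice ([2] ++ List.replicate (cols - 2).toNat 3 ++ [2]) none (some cols)
    else []
  let inner := edge.map (· + 1)
  let grid := [edge] ++ List.replicate (rows - 2).toNat inner ++ [edge]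
  (PySem.List.slice grid none (some rows)).map (fun r => r)

-- ===== PRECONDITION & SPEC =====
def Spec_f14 (rows : Int) (cols : Int) (out : List (List Int)) : Prop := out = f14_alt rows cols
instance (rows : Int) (cols : Int) (out : List (List Int)) : Decidable (Spec_f14 rows cols out) := by unfold Spec_f14; infer_instance

-- ===== CLAIM (what is proved, stated in full; the proofs are below) =====
def Claim_equal_f14 : Prop := ∀ (rows : Int) (cols : Int), Dom_f14 rows cols → Spec_f14 rows cols (f14 rows cols)

-- ===== LEMMAS AND PROOFS =====

-- The edge-row map over the column range equals B's repetition-built edge row.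
lemma edge_eq (cols : Int) :
    (PySem.List.pyRange 0 cols 1).map
        (fun col => 2 + (if 0 < col ∧ col < cols - 1 then (1 : Int) else 0))
    = (if 0 < cols then
        PySem.List.slice ([2] ++ List.replicate (cols - 2).toNat 3 ++ [2]) none (some cols)
      else []) := by
  by_cases h : 0 < cols
  · rw [if_pos h, PySem.List.slice_to _ (by omega)]
    by_cases h1 : cols = 1
    · subst h1; decide
    · -- cols ≥ 2
      rw [PySem.List.pyRange_one_append 0 (cols - 1) cols (by omega) (by omega),
          PySem.List.pyRange_one_cons (by omega)]
      have hmid : (PySem.List.pyRange 1 (cols - 1) 1).map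
          (fun col => 2 + (if 0 < col ∧ col < cols - 1 then (1 : Int) else 0))
          = List.replicate (cols - 2).toNat 3 := by
        rw [PySem.List.pyRange_one, List.map_map,
            show (cols - 1 - 1).toNat = (cols - 2).toNat by omega]
        trans (List.range (cols - 2).toNat).map (fun _ => (3 : Int))
        · apply List.map_congr_left
          intro k hk
          simp only [List.mem_range] at hk
          simp only [Function.comp]
          rw [if_pos ⟨by omega, by omega⟩]
          norm_num
        · simp [List.map_const']
      have hlast : PySem.List.pyRange (cols - 1) cols 1 = [cols - 1] := by
        simpa using PySem.List.pyRange_one_singleton (cols - 1)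
      rw [hlast]
      simp only [zero_add, List.map_cons, List.map_append, List.map_nil, hmid]
      rw [if_neg (by omega), if_neg (by omega)]
      rw [List.take_of_length_le (by simp; omega)]
      norm_num
  · rw [if_neg h, PySem.List.pyRange_one_eq_nil (by omega), List.map_nil]

-- An edge row of A (first or last row: the row indicator is 0) equals B's edge row.
lemma row_map_eq (rows cols row : Int) (hrow : ¬(0 < row ∧ row < rows - 1)) :
    (PySem.List.pyRange 0 cols 1).map (fun col =>
        2 + (if 0 < col ∧ col < cols - 1 then (1 : Int) else 0)
          + (if 0 < row ∧ row < rows - 1 then (1 : Int) else 0))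
    = (if 0 < cols then
        PySem.List.slice ([2] ++ List.replicate (cols - 2).toNat 3 ++ [2]) none (some cols)
      else []) := by
  rw [← edge_eq]
  apply List.map_congr_left
  intro c _
  rw [if_neg hrow, add_zero]

-- An interior row of A equals B's interior row (edge row plus one pointwise).
lemma inner_map_eq (rows cols row : Int) (hrow : 0 < row ∧ row < rows - 1) :
    (PySem.List.pyRange 0 cols 1).map (fun col =>
        2 + (if 0 < col ∧ col < cols - 1 then (1 : Int) else 0)
          + (if 0 < row ∧ row < rows - 1 then (1 : Int) else 0))
    = ((if 0 < cols then
        PySem.List.slice ([2] ++ List.replicate (cols - 2).toNat 3 ++ [2]) none (some cols)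
      else []) : List Int).map (· + 1) := by
  rw [← edge_eq, List.map_map]
  apply List.map_congr_left
  intro c _
  simp only [Function.comp]
  rw [if_pos hrow]

-- ===== VERDICT (by name: the statement is the Claim_ definition above) =====
theorem f14_spec : Claim_equal_f14 := by
  intro rows cols _
  unfold Spec_f14 f14 f14_alt
  simp only [PySem.List.foldl_append_singleton_eq_map, List.nil_append]
  by_cases hr : rows ≤ 0
  · rw [if_pos hr, PySem.List.pyRange_one_eq_nil (a := 0) (b := rows) (by omega), List.map_nil]
  · rw [if_neg hr]
    simp only [List.map_id']
    rw [PySem.List.slice_to (b := rows) _ (by omega)]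
    set E : List Int := (if 0 < cols then
        PySem.List.slice ([2] ++ List.replicate (cols - 2).toNat 3 ++ [2]) none (some cols)
      else []) with hE
    set g : Int → List Int := fun row => (PySem.List.pyRange 0 cols 1).map (fun col =>
        2 + (if 0 < col ∧ col < cols - 1 then (1 : Int) else 0)
          + (if 0 < row ∧ row < rows - 1 then (1 : Int) else 0)) with hg
    have hg0 : g 0 = E := by
      simp only [hg, hE]; exact row_map_eq rows cols 0 (by omega)
    have hgl : g (rows - 1) = E := by
      simp only [hg, hE]; exact row_map_eq rows cols (rows - 1) (by omega)
    by_cases h1 : rows = 1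
    · subst h1
      rw [show PySem.List.pyRange 0 1 1 = [0] by decide]
      simp only [List.map_cons, List.map_nil, hg0]
      simp only [List.cons_append, List.nil_append]
      rw [show ((1 : Int)).toNat = 1 from rfl, List.take_succ_cons, List.take_zero]
    · -- rows ≥ 2
      rw [PySem.List.pyRange_one_append 0 (rows - 1) rows (by omega) (by omega),
          PySem.List.pyRange_one_cons (by omega),
          show PySem.List.pyRange (rows - 1) rows 1 = [rows - 1] by
            simpa using PySem.List.pyRange_one_singleton (rows - 1)]
      have hmid : (PySem.List.pyRange 1 (rows - 1) 1).map g
          = List.replicate (rows - 2).toNat (E.map (· + 1)) := by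
        rw [PySem.List.pyRange_one,
            show (rows - 1 - 1).toNat = (rows - 2).toNat by omega, List.map_map]
        trans (List.range (rows - 2).toNat).map (fun _ => E.map (· + 1))
        · apply List.map_congr_left
          intro k hk
          simp only [List.mem_range] at hk
          simp only [Function.comp, hg, hE]
          exact inner_map_eq rows cols (1 + k) ⟨by omega, by omega⟩
        · simp [List.map_const']
      simp only [zero_add, List.map_cons, List.map_append, List.map_nil, hg0, hgl, hmid]
      simp only [List.cons_append, List.nil_append]
      rw [List.take_of_length_le (by simp; omega)]
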